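-- pv_equiv track=rewrite | github.com/sedlacekradek/Algorithms | revision/NumberSolitaire.py | solution
-- ===== SOURCE A (Python) =====
-- def solution(A):
--     from collections import deque
--     q = deque([A[0]])
--
--     for n in A[1:]:
--         q.append(max(q) + n)
--         if len(q) > 6:
--             q.popleft()
--     return q[-1]
-- ===== SOURCE B (Python) =====
-- def solution(A):
--     n = len(A)
--     dp = [None] * n
--     dp[0] = A[0]
--     for i in range(n):
--         if dp[i] is None:
--             continue
--         for j in range(i + 1, min(i + 6, n - 1) + 1):
--             cand = dp[i] + A[j]
--             if dp[j] is None or cand > dp[j]: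
--                 dp[j] = cand
--     return dp[-1]
-- ===== Notes on version B (the rewrite author's own statement) =====
-- stated objective: alternative
-- what changed: Replaces A's backward pull (a sliding deque of the last six dp values, taking max(q) each step) with a forward push DP over a full dp array: each finalized cell relaxes its up-to-six successors; no deque, no per-step window max.
import Mathlib
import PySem

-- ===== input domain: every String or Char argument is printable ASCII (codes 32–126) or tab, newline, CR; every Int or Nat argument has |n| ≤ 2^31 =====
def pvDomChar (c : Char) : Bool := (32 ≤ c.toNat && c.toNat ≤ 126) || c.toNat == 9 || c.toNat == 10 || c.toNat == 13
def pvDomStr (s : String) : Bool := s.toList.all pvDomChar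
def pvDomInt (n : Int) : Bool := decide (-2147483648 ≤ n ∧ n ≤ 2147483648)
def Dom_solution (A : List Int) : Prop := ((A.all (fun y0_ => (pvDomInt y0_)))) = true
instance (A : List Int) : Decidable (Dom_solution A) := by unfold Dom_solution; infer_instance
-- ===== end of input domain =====

-- B replaces A's backward deque-window scan (max over a sliding ≤6-deque) by a forward push DP
-- over a full dp array, each finalized cell relaxing its up-to-six successors (alternative decomposition).

-- ===== PORT A =====
-- Python max() on a nonempty list (exact for nonempty lists; [] never reaches it in the ports)
def pymax (l : List Int) : Int := match l with | [] => 0 | x :: xs => xs.foldl max x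

def stepA (q : List Int) (x : Int) : List Int :=
  let q' := q ++ [pymax q + x]
  if 6 < q'.length then q'.tail else q'

def solution (A : List Int) : Int :=
  match A with
  | [] => 0
  | a :: rest => (rest.foldl stepA [a]).getLast?.getD 0

-- ===== PORT B =====
def relaxB (A : List Int) (v : Int) (dp : List (Option Int)) (j : Nat) : List (Option Int) :=
  let cand := v + A.getD j 0
  match dp.getD j none with
  | none => dp.set j (some cand)
  | some w => if cand > w then dp.set j (some cand) else dp

def outerB (A : List Int) (n : Nat) (dp : List (Option Int)) (i : Nat) : List (Option Int) :=
  match dp.getD i none with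
  | none => dp
  | some v => (List.range' (i+1) (min (i+6) (n-1) + 1 - (i+1))).foldl (relaxB A v) dp

def solution_alt (A : List Int) : Int :=
  let n := A.length
  let dp0 : List (Option Int) := (List.replicate n none).set 0 (some (A.getD 0 0))
  let dp := (List.range n).foldl (outerB A n) dp0
  (dp.getD (n-1) none).getD 0

-- ===== PRECONDITION & SPEC =====
-- Pre_ excludes only the empty list, on which the Python A raises IndexError (A[0]); B raises there too.
def Pre_solution (A : List Int) : Prop := A ≠ []
instance (A : List Int) : Decidable (Pre_solution A) := by unfold Pre_solution; infer_instance
def pvWitness_solution : List Int := ([1, -2, 3, 4, -5, 6, 7, 2])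

def Spec_solution (A : List Int) (out : Int) : Prop := out = solution_alt A
instance (A : List Int) (out : Int) : Decidable (Spec_solution A out) := by unfold Spec_solution; infer_instance

-- ===== CLAIM (what is proved, stated in full; the proofs are below) =====
def Claim_equal_solution : Prop := ∀ (A : List Int), Dom_solution A → Pre_solution A → Spec_solution A (solution A)

-- ===== LEMMAS AND PROOFS =====

-- FV a l k : the dp value of overall index k = last element of A's deque after k steps
def FV (a : Int) (l : List Int) (k : Nat) : Int := ((l.take k).foldl stepA [a]).getLast?.getD 0


lemma stepA_getLast (q : List Int) (x : Int) (h : q ≠ []) :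
    (stepA q x).getLast?.getD 0 = pymax q + x := by
  unfold stepA
  simp only []
  split
  · cases q with
    | nil => exact absurd rfl h
    | cons c q' => simp [List.getLast?_append]
  · simp [List.getLast?_append]

lemma pymax_concat (l : List Int) (y : Int) (h : l ≠ []) :
    pymax (l ++ [y]) = max (pymax l) y := by
  cases l with
  | nil => exact absurd rfl h
  | cons x xs => simp [pymax, List.foldl_append]

lemma windowA (a : Int) (l : List Int) :
    ∀ k, k ≤ l.length →
      (l.take k).foldl stepA [a]
        = (List.range' (k+1 - min (k+1) 6) (min (k+1) 6)).map (FV a l) := by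
  intro k
  induction k with
  | zero => intro _; simp [FV]
  | succ k ih =>
    intro hk
    have hk' : k < l.length := hk
    have ihs := ih (le_of_lt hk')
    have hne : (List.range' (k+1 - min (k+1) 6) (min (k+1) 6)).map (FV a l) ≠ [] := by
      simp
    have hget : l[k]? = some (l[k]'hk') := List.getElem?_eq_getElem hk'
    have hfold : (l.take (k+1)).foldl stepA [a]
        = stepA ((l.take k).foldl stepA [a]) (l[k]'hk') := by
      rw [List.take_succ, hget]
      simp only [Option.toList_some]
      rw [List.foldl_append]
      simp only [List.foldl_cons, List.foldl_nil]
    have hFV : FV a l (k+1)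
        = pymax ((List.range' (k+1 - min (k+1) 6) (min (k+1) 6)).map (FV a l)) + (l[k]'hk') := by
      show ((l.take (k+1)).foldl stepA [a]).getLast?.getD 0 = _
      rw [hfold, ihs, stepA_getLast _ _ hne]
    rw [hfold, ihs]
    unfold stepA
    simp only []
    rw [← hFV]
    have hcat : (List.range' (k+1 - min (k+1) 6) (min (k+1) 6)).map (FV a l) ++ [FV a l (k+1)]
        = (List.range' (k+1 - min (k+1) 6) (min (k+1) 6 + 1)).map (FV a l) := by
      rw [List.range'_concat]
      have h1 : k + 1 - min (k + 1) 6 + 1 * min (k + 1) 6 = k + 1 := by omega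
      rw [h1]
      simp
    rw [hcat]
    by_cases h6 : min (k+1) 6 = 6
    · have : 6 < ((List.range' (k+1 - min (k+1) 6) (min (k+1) 6 + 1)).map (FV a l)).length := by
        simp [List.length_range']; omega
      rw [if_pos this]
      rw [h6]
      rw [List.range'_succ]
      simp only [List.map_cons, List.tail_cons]
      congr 2 <;> omega
    · have hm : min (k+1) 6 < 6 := by omega
      have : ¬ 6 < ((List.range' (k+1 - min (k+1) 6) (min (k+1) 6 + 1)).map (FV a l)).length := by
        simp [List.length_range']; omega
      rw [if_neg this]
      congr 2 <;> omega

lemma FV_succ (a : Int) (l : List Int) (k : Nat) (hk : k < l.length) :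
    FV a l (k+1)
      = pymax ((List.range' (k+1 - min (k+1) 6) (min (k+1) 6)).map (FV a l)) + l.getD k 0 := by
  have ihs := windowA a l k (le_of_lt hk)
  have hne : (List.range' (k+1 - min (k+1) 6) (min (k+1) 6)).map (FV a l) ≠ [] := by
    simp
  have hget : l[k]? = some (l[k]'hk) := List.getElem?_eq_getElem hk
  have hfold : (l.take (k+1)).foldl stepA [a]
      = stepA ((l.take k).foldl stepA [a]) (l[k]'hk) := by
    rw [List.take_succ, hget]
    simp only [Option.toList_some]
    rw [List.foldl_append]
    simp only [List.foldl_cons, List.foldl_nil]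
  have hgetD : l.getD k 0 = l[k]'hk := by rw [List.getD_eq_getElem?_getD, List.getElem?_eq_getElem hk]; rfl
  show ((l.take (k+1)).foldl stepA [a]).getLast?.getD 0 = _
  rw [hfold, ihs, stepA_getLast _ _ hne, hgetD]

def P (a : Int) (l : List Int) (i j : Nat) : Option Int :=
  if j = 0 then some a
  else if j - 6 < min i j then
    some (pymax ((List.range' (j-6) (min i j - (j-6))).map (FV a l)) + l.getD (j-1) 0)
  else none

lemma P_diag (a : Int) (l : List Int) (i : Nat) (hi : i ≤ l.length) :
    P a l i i = some (FV a l i) := by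
  unfold P
  by_cases h0 : i = 0
  · subst h0; simp [FV]
  · rw [if_neg h0]
    have hlt : i - 6 < min i i := by omega
    rw [if_pos hlt]
    obtain ⟨k, rfl⟩ : ∃ k, i = k + 1 := ⟨i - 1, by omega⟩
    have hk : k < l.length := by omega
    have h1 : min (k+1) (k+1) - (k+1-6) = min (k+1) 6 := by omega
    have h2 : k + 1 - 6 = k + 1 - min (k+1) 6 := by omega
    have h3 : k + 1 - 1 = k := rfl
    rw [h1, h2, h3, ← FV_succ a l k hk]

lemma getD_map_range (f : Nat → Option Int) (n j : Nat) (h : j < n) :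
    ((List.range n).map f).getD j none = f j := by
  rw [List.getD_eq_getElem?_getD]
  rw [List.getElem?_eq_getElem (by simpa using h)]
  simp

lemma set_map_range (f : Nat → Option Int) (n j : Nat) (v : Option Int) :
    ((List.range n).map f).set j v
      = (List.range n).map (fun j' => if j' = j then v else f j') := by
  apply List.ext_getElem
  · simp
  · intro m h1 h2
    simp only [List.getElem_set, List.getElem_map, List.getElem_range]
    simp only [List.length_set, List.length_map, List.length_range] at h1
    by_cases hm : m = j
    · simp [hm]
    · simp [hm, Ne.symm hm]

lemma pymax_map_concat (a : Int) (l : List Int) (lo len : Nat) (h : 1 ≤ len) :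
    pymax ((List.range' lo (len+1)).map (FV a l))
      = max (pymax ((List.range' lo len).map (FV a l))) (FV a l (lo+len)) := by
  rw [List.range'_concat]
  simp only [Nat.one_mul, List.map_append, List.map_cons, List.map_nil]
  rw [pymax_concat]
  simp
  omega

lemma P_stable (a : Int) (l : List Int) (i j : Nat) (h : j ≤ i ∨ i + 6 < j) :
    P a l (i+1) j = P a l i j := by
  unfold P
  by_cases h0 : j = 0
  · simp [h0]
  · rw [if_neg h0, if_neg h0]
    rcases h with h | h
    · have e1 : min (i+1) j = j := by omega
      have e2 : min i j = j := by omega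
      rw [e1, e2]
    · have e1 : ¬ (j - 6 < min (i+1) j) := by omega
      have e2 : ¬ (j - 6 < min i j) := by omega
      rw [if_neg e1, if_neg e2]

lemma P_succ_at (a : Int) (l : List Int) (i j0 : Nat) (h1 : i+1 ≤ j0) (h2 : j0 ≤ i+6) :
    P a l (i+1) j0 = some (match P a l i j0 with
      | none => FV a l i + l.getD (j0-1) 0
      | some w => max w (FV a l i + l.getD (j0-1) 0)) := by
  have hj0 : ¬ (j0 = 0) := by omega
  unfold P
  rw [if_neg hj0, if_neg hj0]
  have emin1 : min (i+1) j0 = i+1 := by omega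
  have hc1 : j0 - 6 < min (i+1) j0 := by omega
  rw [emin1, if_pos (by omega : j0 - 6 < i + 1)]
  have emin0 : min i j0 = i := by omega
  rw [emin0]
  by_cases hc0 : j0 - 6 < i
  · rw [if_pos hc0]
    have hlen : i + 1 - (j0 - 6) = (i - (j0 - 6)) + 1 := by omega
    rw [hlen]
    rw [pymax_map_concat a l (j0-6) (i - (j0-6)) (by omega)]
    have : j0 - 6 + (i - (j0 - 6)) = i := by omega
    rw [this]
    simp only []
    rw [max_add_add_right]
  · rw [if_neg hc0]
    have : j0 - 6 = i := by omega
    rw [this]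
    have : i + 1 - i = 1 := by omega
    rw [this]
    simp [pymax]

lemma relaxB_none (A : List Int) (v : Int) (dp : List (Option Int)) (j : Nat)
    (h : dp.getD j none = none) :
    relaxB A v dp j = dp.set j (some (v + A.getD j 0)) := by
  unfold relaxB
  rw [h]

lemma relaxB_some (A : List Int) (v : Int) (dp : List (Option Int)) (j : Nat) (w : Int)
    (h : dp.getD j none = some w) :
    relaxB A v dp j
      = if v + A.getD j 0 > w then dp.set j (some (v + A.getD j 0)) else dp := by
  unfold relaxB
  rw [h]

lemma innerB (a : Int) (l : List Int) (i : Nat) :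
    ∀ t, i + t ≤ min (i+6) l.length →
      (List.range' (i+1) t).foldl (relaxB (a::l) (FV a l i))
          ((List.range (l.length+1)).map (P a l i))
        = (List.range (l.length+1)).map
            (fun j => if i+1 ≤ j ∧ j < i+1+t then P a l (i+1) j else P a l i j) := by
  intro t
  induction t with
  | zero =>
    intro _
    simp only [List.range'_zero, List.foldl_nil]
    apply List.map_congr_left
    intro j _
    rw [if_neg (by omega)]
  | succ t ih =>
    intro ht
    have ht' : i + t ≤ min (i+6) l.length := by omega
    have hcat : List.range' (i+1) (t+1) = List.range' (i+1) t ++ [i+1+t] := by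
      rw [List.range'_concat]
      simp
    rw [hcat, List.foldl_append, ih ht']
    simp only [List.foldl_cons, List.foldl_nil]
    have hj0n : i+1+t < l.length + 1 := by omega
    have hQ : (if i+1 ≤ i+1+t ∧ i+1+t < i+1+t then P a l (i+1) (i+1+t) else P a l i (i+1+t))
        = P a l i (i+1+t) := if_neg (by omega)
    have hgetA : (a :: l).getD (i+1+t) 0 = l.getD (i+1+t - 1) 0 := by
      have h1 : i+1+t = (i+1+t - 1) + 1 := by omega
      rw [h1]
      rfl
    have hstep := P_succ_at a l i (i+1+t) (by omega) (by omega)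
    have hfin : ∀ (v : Option Int), v = P a l (i+1) (i+1+t) →
        ((List.range (l.length+1)).map
          (fun j => if i+1 ≤ j ∧ j < i+1+t then P a l (i+1) j else P a l i j)).set (i+1+t) v
        = (List.range (l.length+1)).map
            (fun j => if i+1 ≤ j ∧ j < i+1+(t+1) then P a l (i+1) j else P a l i j) := by
      intro v hv
      rw [set_map_range]
      apply List.map_congr_left
      intro j _
      by_cases hj : j = i+1+t
      · rw [if_pos hj, hj, hv, if_pos (by omega)]
      · rw [if_neg hj]
        by_cases hc : i+1 ≤ j ∧ j < i+1+t
        · rw [if_pos hc, if_pos (by omega)]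
        · rw [if_neg hc, if_neg (by omega)]
    have hdp : ((List.range (l.length+1)).map
        (fun j => if i+1 ≤ j ∧ j < i+1+t then P a l (i+1) j else P a l i j)).getD (i+1+t) none
        = P a l i (i+1+t) := by
      rw [getD_map_range _ _ _ hj0n]
      exact hQ
    cases hP : P a l i (i+1+t) with
    | none =>
      rw [relaxB_none _ _ _ _ (hdp.trans hP), hgetA]
      apply hfin
      rw [hstep, hP]
    | some w =>
      rw [relaxB_some _ _ _ _ _ (hdp.trans hP), hgetA]
      by_cases hgt : FV a l i + l.getD (i+1+t-1) 0 > w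
      · rw [if_pos hgt]
        apply hfin
        rw [hstep, hP]
        show _ = some (max w (FV a l i + l.getD (i+1+t-1) 0))
        rw [max_eq_right (le_of_lt hgt)]
      · rw [if_neg hgt]
        have heq : (List.range (l.length+1)).map
            (fun j => if i+1 ≤ j ∧ j < i+1+t then P a l (i+1) j else P a l i j)
            = ((List.range (l.length+1)).map
              (fun j => if i+1 ≤ j ∧ j < i+1+t then P a l (i+1) j else P a l i j)).set (i+1+t) (some w) := by
          rw [set_map_range]
          apply List.map_congr_left
          intro j _
          by_cases hj : j = i+1+t
          · rw [if_pos hj, hj, hQ, hP]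
          · rw [if_neg hj]
        rw [heq]
        apply hfin
        rw [hstep, hP]
        show some w = some (max w (FV a l i + l.getD (i+1+t-1) 0))
        rw [max_eq_left (not_lt.mp hgt)]

lemma outerB_some (A : List Int) (n : Nat) (dp : List (Option Int)) (i : Nat) (v : Int)
    (h : dp.getD i none = some v) :
    outerB A n dp i
      = (List.range' (i+1) (min (i+6) (n-1) + 1 - (i+1))).foldl (relaxB A v) dp := by
  unfold outerB
  rw [h]

lemma invariantB (a : Int) (l : List Int) :
    ∀ i, i ≤ l.length + 1 →
      (List.range i).foldl (outerB (a :: l) (l.length + 1))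
          ((List.replicate (l.length + 1) none).set 0 (some a))
        = (List.range (l.length + 1)).map (P a l i) := by
  intro i
  induction i with
  | zero =>
    intro _
    simp only [List.range_zero, List.foldl_nil]
    apply List.ext_getElem
    · simp
    · intro m h1 h2
      simp only [List.getElem_set, List.getElem_replicate, List.getElem_map, List.getElem_range]
      unfold P
      by_cases hm : m = 0
      · simp [hm]
      · rw [if_neg hm]
        have : ¬ (m - 6 < min 0 m) := by omega
        rw [if_neg this]
        simp [Ne.symm hm]
  | succ i ih =>
    intro hi
    have hi' : i ≤ l.length := by omega
    rw [List.range_succ, List.foldl_append, ih (by omega)]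
    simp only [List.foldl_cons, List.foldl_nil]
    have hget : ((List.range (l.length+1)).map (P a l i)).getD i none = some (FV a l i) := by
      rw [getD_map_range _ _ _ (by omega)]
      exact P_diag a l i hi'
    rw [outerB_some _ _ _ _ _ hget]
    have hcnt : min (i+6) (l.length + 1 - 1) + 1 - (i+1) = min (i+6) l.length - i := by omega
    rw [hcnt]
    rw [innerB a l i (min (i+6) l.length - i) (by omega)]
    apply List.map_congr_left
    intro j hj
    rw [List.mem_range] at hj
    by_cases hc : i+1 ≤ j ∧ j < i+1+(min (i+6) l.length - i)
    · rw [if_pos hc]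
    · rw [if_neg hc]
      exact (P_stable a l i j (by omega)).symm

theorem solution_eq : ∀ (A : List Int), A ≠ [] → solution A = solution_alt A := by
  intro A hpre
  cases A with
  | nil => exact absurd rfl hpre
  | cons a l =>
    have hsol : solution (a :: l) = FV a l l.length := by
      unfold solution FV
      rw [List.take_length]
    have hinv := invariantB a l (l.length + 1) (le_refl _)
    have halt : solution_alt (a :: l)
        = (((List.range (l.length+1)).map (P a l (l.length+1))).getD (l.length+1-1) none).getD 0 := by
      unfold solution_alt
      simp only [List.length_cons, List.getD_cons_zero]
      rw [hinv]
    rw [hsol, halt]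
    have h1 : l.length + 1 - 1 = l.length := by omega
    rw [h1, getD_map_range _ _ _ (by omega)]
    have h2 : P a l (l.length+1) l.length = P a l l.length l.length := by
      unfold P
      have e : min (l.length+1) l.length = min l.length l.length := by omega
      rw [e]
    rw [h2, P_diag a l l.length (le_refl _)]
    rfl

-- ===== VERDICT (by name: the statement is the Claim_ definition above) =====
theorem solution_spec : Claim_equal_solution := by
  intro A _ hpre
  unfold Spec_solution
  exact solution_eq A hpre
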